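-- pv_equiv track=rewrite | github.com/stuja16/Advent2023 | Day 4/Day4Part1.py | getGameScore
-- ===== SOURCE A (Python) =====
-- def getGameScore(winning, given):
--     matches = 0
--
--     for x in given:
--         for y in winning:
--             if x == y:
--                 matches += 1
--
--     if matches > 1:
--         return pow(2, matches-1)
--     else:
--         return matches
-- ===== SOURCE B (Python) =====
-- def getGameScore(winning, given):
--     count_w = {}
--     for y in winning:
--         count_w[y] = count_w.get(y, 0) + 1
--     count_g = {}
--     for x in given:
--         count_g[x] = count_g.get(x, 0) + 1
--     matches = 0
--     for v, c in count_g.items():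
--         matches += c * count_w.get(v, 0)
--     if matches > 1:
--         return 2 ** (matches - 1)
--     else:
--         return matches
-- ===== Notes on version B (the rewrite author's own statement) =====
-- stated objective: faster
-- what changed: Replaces A's nested scan of winning for every element of given by two dict frequency tables built in one pass each, summing count_given[v]*count_winning[v] over the distinct values of given.
import Mathlib
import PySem

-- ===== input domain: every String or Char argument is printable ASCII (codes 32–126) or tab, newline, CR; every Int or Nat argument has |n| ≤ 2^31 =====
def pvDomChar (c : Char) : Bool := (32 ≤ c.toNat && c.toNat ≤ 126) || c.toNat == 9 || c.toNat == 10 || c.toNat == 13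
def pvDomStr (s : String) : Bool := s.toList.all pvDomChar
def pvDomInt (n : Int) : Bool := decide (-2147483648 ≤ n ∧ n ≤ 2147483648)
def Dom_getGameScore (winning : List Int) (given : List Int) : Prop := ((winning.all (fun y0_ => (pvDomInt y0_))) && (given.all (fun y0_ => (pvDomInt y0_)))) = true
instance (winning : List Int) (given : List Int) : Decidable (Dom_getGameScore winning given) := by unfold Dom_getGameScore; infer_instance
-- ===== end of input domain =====

-- B replaces A's nested O(|given|*|winning|) pair scan by two one-pass frequency dicts and a
-- sum of count products over given's distinct values; same return value everywhere (A is total).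


-- ===== PORT A =====
-- Port of A: nested loops counting equal pairs, then the score branch.
def getGameScore (winning : List Int) (given : List Int) : Int :=
  let nmatch : Int :=
    given.foldl (fun m x =>
      winning.foldl (fun m y => if x == y then m + 1 else m) m) 0
  if nmatch > 1 then 2 ^ (nmatch - 1).toNat else nmatch

-- ===== PORT B =====
-- Port of B: two one-pass frequency dicts, then sum c * count_w[v] over count_g's items.
def getGameScore_alt (winning : List Int) (given : List Int) : Int :=
  let countW : PySem.Dict Int Int :=
    winning.foldl (fun d y => d.insert y (d.getD y 0 + 1)) PySem.Dict.empty
  let countG : PySem.Dict Int Int :=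
    given.foldl (fun d x => d.insert x (d.getD x 0 + 1)) PySem.Dict.empty
  let nmatch : Int :=
    countG.items.foldl (fun acc p => acc + p.2 * countW.getD p.1 0) 0
  if nmatch > 1 then 2 ^ (nmatch - 1).toNat else nmatch

-- ===== PRECONDITION & SPEC =====
def Spec_getGameScore (winning : List Int) (given : List Int) (out : Int) : Prop := out = getGameScore_alt winning given
instance (winning : List Int) (given : List Int) (out : Int) : Decidable (Spec_getGameScore winning given out) := by unfold Spec_getGameScore; infer_instance

-- ===== CLAIM (what is proved, stated in full; the proofs are below) =====
def Claim_equal_getGameScore : Prop := ∀ (winning : List Int) (given : List Int), Dom_getGameScore winning given → Spec_getGameScore winning given (getGameScore winning given)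

-- ===== LEMMAS AND PROOFS =====
-- Both match-counts equal the pair count Σ_{x ∈ given} (winning.count x).
lemma matchesA_eq (winning given : List Int) :
    given.foldl (fun m x =>
      winning.foldl (fun m y => if x == y then m + 1 else m) m) 0
      = (given.map (fun x => (winning.count x : Int))).sum := by
  have hinner : ∀ (x m : Int),
      winning.foldl (fun m y => if x == y then m + 1 else m) m
        = m + (winning.count x : Int) := by
    intro x m
    have hflip : winning.foldl (fun m y => if x == y then m + 1 else m) m
        = winning.foldl (fun m y => if y == x then m + 1 else m) m :=
      by apply PySem.List.foldl_congr_mem; intro acc y _; simp [BEq.comm]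
    rw [hflip]
    exact PySem.List.foldl_beq_add_one ..
  have houter : given.foldl (fun m x =>
        winning.foldl (fun m y => if x == y then m + 1 else m) m) 0
      = given.foldl (fun m x => m + (winning.count x : Int)) 0 :=
    by apply PySem.List.foldl_congr_mem; intro m x _; exact hinner x m
  have hadd : given.foldl (fun m x => m + (winning.count x : Int)) 0
      = 0 + (given.map (fun x => (winning.count x : Int))).sum :=
    PySem.List.foldl_add ..
  rw [houter, hadd, zero_add]

lemma sum_counts_eq (winning given : List Int) :
    ((PySem.Dict.counter given).items.foldl
        (fun acc p => acc + p.2 * (PySem.Dict.counter winning).getD p.1 0) 0)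
      = (given.map (fun x => (winning.count x : Int))).sum := by
  rw [PySem.Dict.items_counter]
  have hadd : ((PySem.Set.ofList given).map
        (fun k => (k, (given.count k : Int)))).foldl
        (fun acc p => acc + p.2 * (PySem.Dict.counter winning).getD p.1 0) 0
      = 0 + (((PySem.Set.ofList given).map (fun k => (k, (given.count k : Int)))).map
          (fun p => p.2 * (PySem.Dict.counter winning).getD p.1 0)).sum :=
    PySem.List.foldl_add ..
  rw [hadd, zero_add, List.map_map]
  simp only [PySem.Dict.getD_counter]
  have hfin : (PySem.Set.ofList given).toFinset = given.toFinset := by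
    ext v; simp [List.mem_toFinset, PySem.Set.mem_ofList]
  rw [← List.sum_toFinset _ (PySem.Set.nodup_ofList (xs := given)), hfin,
      Finset.sum_list_map_count]
  simp

-- ===== VERDICT =====
theorem getGameScore_spec : Claim_equal_getGameScore := by
  intro winning given _
  unfold Spec_getGameScore getGameScore getGameScore_alt
  simp only [PySem.Dict.foldl_insert_getD_add_one_eq_counter, matchesA_eq, sum_counts_eq]
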